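-- pv_equiv track=rewrite | github.com/hu6r1s/Problem-Solving | 프로그래머스/Lv.1/161989. 덧칠하기/덧칠하기.py | solution
-- ===== SOURCE A (Python) =====
-- def solution(n, m, section):
--     count = 0
--     while section:
--         left = section[0]
--         right = left + m
--         while section and section[0] < right:
--             section.pop(0)
--         count += 1
--     return count
-- ===== SOURCE B (Python) =====
-- def solution(n, m, section):
--     count = 0
--     bound = None
--     for s in section:
--         if bound is None or s >= bound:
--             count += 1
--             bound = s + m
--     return count
-- ===== Notes on version B (the rewrite author's own statement) =====
-- stated objective: faster
-- what changed: Replaces the nested while loops with pop(0) by a single left-to-right pass keeping a running right boundary of the current stroke, so no element is ever shifted or rescanned.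
import Mathlib
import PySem

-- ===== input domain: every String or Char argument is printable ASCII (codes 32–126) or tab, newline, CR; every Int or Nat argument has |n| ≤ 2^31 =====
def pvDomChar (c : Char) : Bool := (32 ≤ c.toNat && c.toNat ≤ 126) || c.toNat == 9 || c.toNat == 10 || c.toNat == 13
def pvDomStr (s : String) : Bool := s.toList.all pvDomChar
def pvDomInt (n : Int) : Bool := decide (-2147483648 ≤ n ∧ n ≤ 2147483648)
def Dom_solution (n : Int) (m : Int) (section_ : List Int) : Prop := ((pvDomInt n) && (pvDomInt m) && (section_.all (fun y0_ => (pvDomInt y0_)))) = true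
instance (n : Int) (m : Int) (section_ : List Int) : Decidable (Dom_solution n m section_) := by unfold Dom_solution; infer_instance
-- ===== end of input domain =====

-- ===== PORT A =====
-- B changes only the algorithm, not the result; note: Python A empties the caller's
-- `section` list via pop(0) (B does not mutate): the equivalence proved is about the return value.
-- Outer `while section` loop, fuel-bounded (fuel = length suffices under Pre_: each
-- iteration pops at least the head since left < left + m when 0 < m).
def solutionGo (m : Int) : Nat → List Int → Int → Int
  | _, [], count => count
  | 0, _ :: _, count => count
  | Nat.succ fuel, left :: rest, count =>
      solutionGo m fuel (List.dropWhile (fun x => decide (x < left + m)) (left :: rest)) (count + 1)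

def solution (n : Int) (m : Int) (section_ : List Int) : Int :=
  solutionGo m section_.length section_ 0

-- ===== PORT B =====
def solutionAltStep (m : Int) (st : Int × Option Int) (s : Int) : Int × Option Int :=
  match st.2 with
  | none => (st.1 + 1, some (s + m))
  | some b => if b ≤ s then (st.1 + 1, some (s + m)) else st

def solution_alt (n : Int) (m : Int) (section_ : List Int) : Int :=
  (section_.foldl (solutionAltStep m) (0, none)).1

-- ===== PRECONDITION & SPEC =====
-- Pre_ excludes exactly the inputs on which Python A never returns: with m <= 0 and a
-- nonempty section the inner loop pops nothing and the outer loop spins forever.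
def Pre_solution (n : Int) (m : Int) (section_ : List Int) : Prop := 0 < m ∨ section_ = []
instance (n : Int) (m : Int) (section_ : List Int) : Decidable (Pre_solution n m section_) := by unfold Pre_solution; infer_instance
def pvWitness_solution : Int × Int × List Int := (8, 4, [2, 4, 6])
def Spec_solution (n : Int) (m : Int) (section_ : List Int) (out : Int) : Prop := out = solution_alt n m section_
instance (n : Int) (m : Int) (section_ : List Int) (out : Int) : Decidable (Spec_solution n m section_ out) := by unfold Spec_solution; infer_instance

-- ===== CLAIM (what is proved, stated in full; the proofs are below) =====
def Claim_equal_solution : Prop := ∀ (n : Int) (m : Int) (section_ : List Int), Dom_solution n m section_ → Pre_solution n m section_ → Spec_solution n m section_ (solution n m section_)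

-- ===== LEMMAS AND PROOFS =====

-- While elements are below the current bound b, B's fold skips them.
theorem foldB_dropWhile (m b : Int) (c : Int) (xs : List Int) :
    List.foldl (solutionAltStep m) (c, some b) xs
      = List.foldl (solutionAltStep m) (c, some b) (List.dropWhile (fun x => decide (x < b)) xs) := by
  induction xs with
  | nil => rfl
  | cons x rest ih =>
      by_cases hx : x < b
      · simpa [List.dropWhile, hx, solutionAltStep, not_le.mpr hx] using ih
      · simp [List.dropWhile, hx]

-- Once the head (if any) is at least b, the state (c, some b) behaves like (c, none).
theorem foldB_some_eq_none (m b c : Int) (xs : List Int)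
    (h : ∀ x ∈ xs.head?, b ≤ x) :
    (List.foldl (solutionAltStep m) (c, some b) xs).1
      = (List.foldl (solutionAltStep m) (c, none) xs).1 := by
  cases xs with
  | nil => rfl
  | cons x rest =>
      have hb : b ≤ x := h x rfl
      simp [List.foldl, solutionAltStep, hb]

theorem head_dropWhile_ge (b : Int) (xs : List Int) :
    ∀ x ∈ (List.dropWhile (fun x => decide (x < b)) xs).head?, b ≤ x := by
  intro x hx
  have h1 := List.head?_dropWhile_not (p := fun x => decide (x < b)) (l := xs)
  cases hh : (List.dropWhile (fun x => decide (x < b)) xs).head? with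
  | none => simp [hh] at hx
  | some y =>
      rw [hh] at h1 hx
      simp at h1 hx
      subst hx
      omega

theorem solutionGo_eq_foldB (m : Int) (hm : 0 < m) :
    ∀ (fuel : Nat) (xs : List Int) (c : Int), xs.length ≤ fuel →
      solutionGo m fuel xs c = (List.foldl (solutionAltStep m) (c, none) xs).1 := by
  intro fuel
  induction fuel with
  | zero =>
      intro xs c hlen
      have : xs = [] := List.length_eq_zero_iff.mp (Nat.le_zero.mp hlen)
      subst this; rfl
  | succ f ih =>
      intro xs c hlen
      cases xs with
      | nil => rfl
      | cons x rest =>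
          have hx : x < x + m := by omega
          have hdrop : List.dropWhile (fun y => decide (y < x + m)) (x :: rest)
              = List.dropWhile (fun y => decide (y < x + m)) rest := by
            simp [List.dropWhile, hx]
          have hlen2 : (List.dropWhile (fun y => decide (y < x + m)) rest).length ≤ f := by
            have := List.length_dropWhile_le (p := fun y => decide (y < x + m)) (l := rest)
            simp only [List.length_cons] at hlen
            omega
          calc solutionGo m (f + 1) (x :: rest) c
              = solutionGo m f (List.dropWhile (fun y => decide (y < x + m)) rest) (c + 1) := by
                simp [solutionGo, hdrop]
            _ = (List.foldl (solutionAltStep m) (c + 1, none)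
                  (List.dropWhile (fun y => decide (y < x + m)) rest)).1 := ih _ _ hlen2
            _ = (List.foldl (solutionAltStep m) (c + 1, some (x + m))
                  (List.dropWhile (fun y => decide (y < x + m)) rest)).1 := by
                exact (foldB_some_eq_none _ _ _ _ (head_dropWhile_ge _ _)).symm
            _ = (List.foldl (solutionAltStep m) (c + 1, some (x + m)) rest).1 := by
                rw [← foldB_dropWhile]
            _ = (List.foldl (solutionAltStep m) (c, none) (x :: rest)).1 := by
                simp [List.foldl, solutionAltStep]

-- ===== VERDICT (by name: the statement is the Claim_ definition above) =====
theorem solution_spec : Claim_equal_solution := by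
  intro n m section_ _ hpre
  unfold Spec_solution solution solution_alt
  rcases hpre with hm | hempty
  · exact solutionGo_eq_foldB m hm _ _ _ le_rfl
  · subst hempty; rfl
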